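-- pv_equiv track=rewrite | github.com/bgh331/Ohjelmistokehityksen_teknologioita_kurssi | postinumero.py | toimipaikat_ja_numerot
-- ===== SOURCE A (Python) =====
-- def toimipaikat_ja_numerot(postinumerot):
--     toimipaikat_ja_numerot = {}
--     for numero, toimipaikka in postinumerot.items():
--         if toimipaikka in toimipaikat_ja_numerot:
--             toimipaikat_ja_numerot[toimipaikka].append(numero)
--         else:
--             toimipaikat_ja_numerot[toimipaikka] = [numero]
--     return toimipaikat_ja_numerot
-- ===== SOURCE B (Python) =====
-- def toimipaikat_ja_numerot(postinumerot):
--     items = list(postinumerot.items())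
--     offices = dict.fromkeys(v for _, v in items)
--     return {o: [n for n, v in items if v == o] for o in offices}
-- ===== Notes on version B (the rewrite author's own statement) =====
-- stated objective: alternative
-- what changed: B replaces the incremental append-into-dict grouping with a two-pass strategy: first collect the distinct office names in first-occurrence order (dict.fromkeys), then build each office's number list by one filtering comprehension over the items.
import Mathlib
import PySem

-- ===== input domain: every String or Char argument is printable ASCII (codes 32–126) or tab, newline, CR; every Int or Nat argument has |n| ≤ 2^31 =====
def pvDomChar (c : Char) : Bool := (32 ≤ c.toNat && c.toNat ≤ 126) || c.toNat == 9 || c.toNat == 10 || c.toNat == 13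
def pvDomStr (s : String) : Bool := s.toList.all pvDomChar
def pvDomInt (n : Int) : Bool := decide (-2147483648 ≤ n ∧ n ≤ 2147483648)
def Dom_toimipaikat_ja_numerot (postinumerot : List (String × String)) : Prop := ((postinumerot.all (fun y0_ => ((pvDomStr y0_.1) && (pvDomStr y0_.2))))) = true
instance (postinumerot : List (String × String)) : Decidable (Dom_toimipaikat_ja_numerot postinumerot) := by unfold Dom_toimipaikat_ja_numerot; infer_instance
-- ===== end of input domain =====

-- B groups by a different decomposition: distinct offices first, then one filter per office;
-- objective: alternative (same results, no speed claim).
-- ===== PORT A =====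
-- A: one pass over the items, appending each number to its office's list in a dict.
def toimipaikat_ja_numerot (postinumerot : List (String × String)) : List (String × List String) :=
  (postinumerot.foldl
    (fun d p =>
      if d.contains p.2 then
        d.modify p.2 [] (fun ns => ns ++ [p.1])   -- toimipaikat_ja_numerot[toimipaikka].append(numero)
      else
        d.insert p.2 [p.1])                       -- toimipaikat_ja_numerot[toimipaikka] = [numero]
    (PySem.Dict.empty : PySem.Dict String (List String))).items

-- ===== PORT B =====
-- B: offices = dict.fromkeys(values) (ordered dedup), then one filtering pass per office.
def toimipaikat_ja_numerot_alt (postinumerot : List (String × String)) : List (String × List String) :=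
  (PySem.List.dedup (postinumerot.map (fun p => p.2))).map
    (fun o => (o, (postinumerot.filter (fun p => p.2 == o)).map (fun p => p.1)))

-- ===== PRECONDITION & SPEC =====
def Spec_toimipaikat_ja_numerot (postinumerot : List (String × String)) (out : List (String × List String)) : Prop := out = toimipaikat_ja_numerot_alt postinumerot
instance (postinumerot : List (String × String)) (out : List (String × List String)) : Decidable (Spec_toimipaikat_ja_numerot postinumerot out) := by unfold Spec_toimipaikat_ja_numerot; infer_instance

-- ===== CLAIM (what is proved, stated in full; the proofs are below) =====
def Claim_equal_toimipaikat_ja_numerot : Prop := ∀ (postinumerot : List (String × String)), Dom_toimipaikat_ja_numerot postinumerot → Spec_toimipaikat_ja_numerot postinumerot (toimipaikat_ja_numerot postinumerot)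

-- ===== LEMMAS AND PROOFS =====

-- A's if/else step is exactly Dict.modify (modify inserts f(default) at the end when the key is absent).
theorem pv_step_eq (d : PySem.Dict String (List String)) (p : String × String) :
    (if d.contains p.2 then d.modify p.2 [] (fun ns => ns ++ [p.1]) else d.insert p.2 [p.1])
      = d.modify p.2 [] (fun ns => ns ++ [p.1]) := by
  by_cases h : d.contains p.2
  · simp [h]
  · simp only [Bool.not_eq_true] at h
    have hg : d.getD p.2 [] = [] := by
      simp only [PySem.Dict.getD, PySem.Dict.get?]
      rw [List.find?_eq_none.mpr]
      · rfl
      · intro q hq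
        simp only [PySem.Dict.contains, List.any_eq_false] at h
        simpa using h q hq
    simp [h, PySem.Dict.modify, hg]

-- the accumulated dict's lookup at each office is the filtered list of numbers
theorem pv_getD (l : List (String × String)) (o : String) :
    ((l.foldl (fun d p => d.modify p.2 [] (fun ns => ns ++ [p.1]))
        (PySem.Dict.empty : PySem.Dict String (List String))).getD o [])
      = (l.filter (fun p => p.2 == o)).map (fun p => p.1) := by
  have h := PySem.Dict.getD_foldl_modify_append (l.map Prod.swap)
    (PySem.Dict.empty : PySem.Dict String (List String)) o
  rw [List.foldl_map] at h
  simpa [List.filter_map, List.map_map, Function.comp, Prod.swap] using h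

-- ===== VERDICT (by name: the statement is the Claim_ definition above) =====
theorem toimipaikat_ja_numerot_spec : Claim_equal_toimipaikat_ja_numerot := by
  intro l _
  unfold Spec_toimipaikat_ja_numerot toimipaikat_ja_numerot toimipaikat_ja_numerot_alt
  have hstep : (fun (d : PySem.Dict String (List String)) (p : String × String) =>
      if d.contains p.2 then d.modify p.2 [] (fun ns => ns ++ [p.1]) else d.insert p.2 [p.1])
      = fun d p => d.modify p.2 [] (fun ns => ns ++ [p.1]) := by
    funext d p; exact pv_step_eq d p
  rw [hstep]
  set d := l.foldl (fun d p => d.modify p.2 [] (fun ns => ns ++ [p.1]))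
    (PySem.Dict.empty : PySem.Dict String (List String)) with hd
  have hkeys : d.keys = PySem.List.dedup (l.map (fun p => p.2)) := by
    rw [hd, PySem.Dict.keys_foldl_modify_key l (fun p => p.2) [] (fun _ p ns => ns ++ [p.1])]
    rfl
  have hnd : d.keys.Nodup := by
    rw [hd]
    exact PySem.Dict.nodup_keys_foldl_modify_key l (fun p => p.2) [] (fun _ p ns => ns ++ [p.1])
      _ List.nodup_nil
  rw [PySem.Dict.items_eq_map_keys d hnd [], hkeys]
  refine List.map_congr_left (fun o _ => ?_)
  rw [hd, pv_getD]
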